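-- pv_equiv track=rewrite | github.com/Annmayn/advent_of_code | advent_of_code/2020/day_07_handy_haversacks.py | part_one
-- ===== SOURCE A (Python) =====
-- Graph = dict[str, list[tuple[str, int]]]
--
-- def part_one(src: str, graph: Graph, visited: dict[str, bool]) -> int:
--     neigh = graph.get(src)
--     if neigh is None:
--         return 0
--     counter = 0
--     for (each, _) in neigh:
--         if each not in visited:
--             visited[each] = True
--             counter += 1
--             each_counter = part_one(each, graph, visited)
--             counter += each_counter
--     return counter
-- ===== SOURCE B (Python) =====
-- Graph = dict[str, list[tuple[str, int]]]
--
-- def part_one(src: str, graph: Graph, visited: dict[str, bool]) -> int: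
--     # Iterative DFS with an explicit stack of frames (remaining-neighbour lists)
--     # instead of recursion; visits nodes in the same order as the recursive version.
--     if graph.get(src) is None:
--         return 0
--     counter = 0
--     stack = [list(graph[src])]
--     while stack:
--         frame = stack[-1]
--         if not frame:
--             stack.pop()
--             continue
--         each, _ = frame.pop(0)
--         if each not in visited:
--             visited[each] = True
--             counter += 1
--             neigh = graph.get(each)
--             if neigh is not None:
--                 stack.append(list(neigh))
--     return counter
-- ===== Notes on version B (the rewrite author's own statement) =====
-- stated objective: alternative
-- what changed: Replaces the recursive DFS by an iterative loop over an explicit stack of remaining-neighbour frames, so no call recursion (and no RecursionError on deep graphs); same visiting order, same count, same mutation of visited.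
import Mathlib
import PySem

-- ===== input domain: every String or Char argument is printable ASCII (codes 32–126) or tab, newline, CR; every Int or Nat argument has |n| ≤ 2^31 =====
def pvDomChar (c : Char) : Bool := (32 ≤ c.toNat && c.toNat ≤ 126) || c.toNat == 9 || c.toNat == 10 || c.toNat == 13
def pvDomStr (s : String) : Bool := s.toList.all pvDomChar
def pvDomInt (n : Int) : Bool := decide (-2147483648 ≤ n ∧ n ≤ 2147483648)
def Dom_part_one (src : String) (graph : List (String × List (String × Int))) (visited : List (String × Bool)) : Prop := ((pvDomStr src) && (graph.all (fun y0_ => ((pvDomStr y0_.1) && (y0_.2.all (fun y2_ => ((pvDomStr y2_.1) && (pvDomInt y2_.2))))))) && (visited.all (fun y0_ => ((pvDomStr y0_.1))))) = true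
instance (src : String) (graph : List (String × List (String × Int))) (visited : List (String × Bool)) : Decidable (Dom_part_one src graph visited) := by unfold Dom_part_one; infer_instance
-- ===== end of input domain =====

-- B replaces A's recursion by an iterative explicit-stack DFS (same visiting order, same count);
-- both A and B mutate `visited` identically in Python — the theorems are about the return value.

-- number of graph keys not yet visited: the decreasing part of both termination measures
def pvUnvis (graph : List (String × List (String × Int))) (v : PySem.Dict String Bool) : Nat :=
  ((graph.map (·.1)).filter (fun k => !(v.contains k))).length

theorem pvCountP_lt {α : Type} (L : List α) (p q : α → Bool) (x : α)
    (hx : x ∈ L) (hpx : p x = true) (hqx : q x = false)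
    (hmono : ∀ a, q a = true → p a = true) :
    L.countP q < L.countP p := by
  induction L with
  | nil => cases hx
  | cons a t ih =>
    rcases List.mem_cons.mp hx with rfl | hxt
    · have hle : t.countP q ≤ t.countP p := List.countP_mono_left (fun a _ => hmono a)
      simp [hpx, hqx]
      omega
    · have h1 := ih hxt
      by_cases hq : q a = true
      · have hp := hmono a hq
        simp [hq, hp]
        omega
      · have hq' := eq_false_of_ne_true hq
        cases hpa : p a <;> simp [hq', hpa] <;> omega

theorem pvUnvis_le (graph : List (String × List (String × Int)))
    (v w : PySem.Dict String Bool)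
    (h : ∀ k, v.contains k = true → w.contains k = true) :
    pvUnvis graph w ≤ pvUnvis graph v := by
  simp only [pvUnvis, ← List.countP_eq_length_filter]
  apply List.countP_mono_left
  intro a _
  simp only [Bool.not_eq_true']
  intro hw
  cases hv : v.contains a with
  | false => rfl
  | true => rw [h a hv] at hw; cases hw

theorem pvUnvis_insert_lt (graph : List (String × List (String × Int)))
    (v : PySem.Dict String Bool) (each : String)
    (hmem : each ∈ graph.map (·.1)) (hnv : ¬ v.contains each = true) :
    pvUnvis graph (v.insert each true) < pvUnvis graph v := by
  simp only [pvUnvis, ← List.countP_eq_length_filter]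
  apply pvCountP_lt _ _ _ each hmem
  · simp at hnv ⊢; exact hnv
  · simp
  · intro a
    simp only [Bool.not_eq_true']
    intro hw
    rw [PySem.Dict.contains_insert] at hw
    cases hva : v.contains a with
    | false => rfl
    | true => simp [hva] at hw

theorem pvMem_of_get?_some (graph : List (String × List (String × Int)))
    (k : String) (l : List (String × Int))
    (h : (PySem.Dict.mk graph).get? k = some l) : k ∈ graph.map (·.1) := by
  have : k ∈ (PySem.Dict.mk graph).keys := by
    by_contra hk
    rw [(PySem.Dict.get?_eq_none_iff_not_mem_keys _ _).mpr hk] at h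
    cases h
  simpa [PySem.Dict.keys] using this

-- ===== PORT A =====
-- A's recursive body; the recursive part_one(each, …) call is inlined as its own
-- graph lookup followed by this loop (exactly A's steps). The subtype on the result
-- only records that `visited` never shrinks, which the termination proof needs.
def pvGoA (graph : List (String × List (String × Int))) :
    (pending : List (String × Int)) → (v : PySem.Dict String Bool) →
    {p : Int × PySem.Dict String Bool // ∀ k, v.contains k = true → p.2.contains k = true}
  | [], v => ⟨(0, v), fun _ h => h⟩
  | (each, _) :: rest, v =>
    if hmem : v.contains each = true then
      pvGoA graph rest v
    else
      match hg : (PySem.Dict.mk graph).get? each with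
      | none =>
        let r := pvGoA graph rest (v.insert each true)
        ⟨(1 + 0 + r.1.1, r.1.2),
          fun k hk => r.2 k (by rw [PySem.Dict.contains_insert, hk, Bool.or_true])⟩
      | some neigh =>
        let r1 := pvGoA graph neigh (v.insert each true)
        let r2 := pvGoA graph rest r1.1.2
        ⟨(1 + r1.1.1 + r2.1.1, r2.1.2),
          fun k hk => r2.2 k (r1.2 k (by rw [PySem.Dict.contains_insert, hk, Bool.or_true]))⟩
termination_by pending v => (pvUnvis graph v, pending.length)
decreasing_by
  · exact Prod.Lex.right _ (Nat.lt_succ_self _)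
  · rcases Nat.lt_or_ge (pvUnvis graph (v.insert each true)) (pvUnvis graph v) with h | h
    · exact Prod.Lex.left _ _ h
    · have hle := pvUnvis_le graph v (v.insert each true)
        (fun k hk => by rw [PySem.Dict.contains_insert, hk, Bool.or_true])
      rw [Nat.le_antisymm hle h]
      exact Prod.Lex.right _ (Nat.lt_succ_self _)
  · exact Prod.Lex.left _ _ (pvUnvis_insert_lt graph v each (pvMem_of_get?_some graph each neigh hg) hmem)
  · exact Prod.Lex.left _ _
      (Nat.lt_of_le_of_lt (pvUnvis_le graph _ _ r1.2)
        (pvUnvis_insert_lt graph v each (pvMem_of_get?_some graph each neigh hg) hmem))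

def part_one (src : String) (graph : List (String × List (String × Int))) (visited : List (String × Bool)) : Int :=
  match (PySem.Dict.mk graph).get? src with
  | none => 0
  | some neigh => (pvGoA graph neigh (PySem.Dict.mk visited)).1.1

-- ===== PORT B =====
-- B's while loop: the stack is a list of remaining-neighbour frames, head = top.
def pvLoopB (graph : List (String × List (String × Int))) :
    (stack : List (List (String × Int))) → (v : PySem.Dict String Bool) → (counter : Int) → Int
  | [], _, c => c
  | [] :: rest, v, c => pvLoopB graph rest v c
  | ((each, _) :: frame) :: rest, v, c =>
    if hmem : v.contains each = true then
      pvLoopB graph (frame :: rest) v c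
    else
      match hg : (PySem.Dict.mk graph).get? each with
      | none => pvLoopB graph (frame :: rest) (v.insert each true) (c + 1)
      | some neigh => pvLoopB graph (neigh :: frame :: rest) (v.insert each true) (c + 1)
termination_by stack v _ => (pvUnvis graph v, (stack.map (fun f => f.length + 1)).sum)
decreasing_by
  · exact Prod.Lex.right _ (by simp)
  · exact Prod.Lex.right _ (by simp)
  · rcases Nat.lt_or_ge (pvUnvis graph (v.insert each true)) (pvUnvis graph v) with h | h
    · exact Prod.Lex.left _ _ h
    · have hle := pvUnvis_le graph v (v.insert each true)
        (fun k hk => by rw [PySem.Dict.contains_insert, hk, Bool.or_true])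
      rw [Nat.le_antisymm hle h]
      exact Prod.Lex.right _ (by simp)
  · exact Prod.Lex.left _ _ (pvUnvis_insert_lt graph v each (pvMem_of_get?_some graph each neigh hg) hmem)

def part_one_alt (src : String) (graph : List (String × List (String × Int))) (visited : List (String × Bool)) : Int :=
  match (PySem.Dict.mk graph).get? src with
  | none => 0
  | some neigh => pvLoopB graph [neigh] (PySem.Dict.mk visited) 0

-- ===== PRECONDITION & SPEC =====
def Spec_part_one (src : String) (graph : List (String × List (String × Int))) (visited : List (String × Bool)) (out : Int) : Prop := out = part_one_alt src graph visited
instance (src : String) (graph : List (String × List (String × Int))) (visited : List (String × Bool)) (out : Int) : Decidable (Spec_part_one src graph visited out) := by unfold Spec_part_one; infer_instance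

-- ===== CLAIM (what is proved, stated in full; the proofs are below) =====
def Claim_equal_part_one : Prop := ∀ (src : String) (graph : List (String × List (String × Int))) (visited : List (String × Bool)), Dom_part_one src graph visited → Spec_part_one src graph visited (part_one src graph visited)

-- ===== LEMMAS AND PROOFS =====

-- value-level equation lemmas for pvGoA (the dependent match needs `split` once)
theorem pvGoA_nil (graph : List (String × List (String × Int))) (v : PySem.Dict String Bool) :
    (pvGoA graph [] v).1 = (0, v) := by rw [pvGoA]

theorem pvGoA_cons_visited (graph : List (String × List (String × Int)))
    (each : String) (w : Int) (restp : List (String × Int)) (v : PySem.Dict String Bool)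
    (hmem : v.contains each = true) :
    (pvGoA graph ((each, w) :: restp) v).1 = (pvGoA graph restp v).1 := by
  rw [pvGoA, dif_pos hmem]

theorem pvGoA_cons_none (graph : List (String × List (String × Int)))
    (each : String) (w : Int) (restp : List (String × Int)) (v : PySem.Dict String Bool)
    (hmem : ¬ v.contains each = true) (hg : (PySem.Dict.mk graph).get? each = none) :
    (pvGoA graph ((each, w) :: restp) v).1
      = (1 + 0 + (pvGoA graph restp (v.insert each true)).1.1,
         (pvGoA graph restp (v.insert each true)).1.2) := by
  rw [pvGoA, dif_neg hmem]
  split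
  · rfl
  · rename_i n heq
    rw [hg] at heq
    simp at heq

theorem pvGoA_cons_some (graph : List (String × List (String × Int)))
    (each : String) (w : Int) (restp : List (String × Int)) (v : PySem.Dict String Bool)
    (neigh : List (String × Int))
    (hmem : ¬ v.contains each = true) (hg : (PySem.Dict.mk graph).get? each = some neigh) :
    (pvGoA graph ((each, w) :: restp) v).1
      = (1 + (pvGoA graph neigh (v.insert each true)).1.1
           + (pvGoA graph restp (pvGoA graph neigh (v.insert each true)).1.2).1.1,
         (pvGoA graph restp (pvGoA graph neigh (v.insert each true)).1.2).1.2) := by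
  rw [pvGoA, dif_neg hmem]
  split
  · rename_i heq
    rw [hg] at heq
    simp at heq
  · rename_i n heq
    rw [hg] at heq
    injection heq with h
    subst h
    rfl

-- equation lemmas for pvLoopB
theorem pvLoopB_nil (graph : List (String × List (String × Int)))
    (v : PySem.Dict String Bool) (c : Int) : pvLoopB graph [] v c = c := by
  rw [pvLoopB]

theorem pvLoopB_empty (graph : List (String × List (String × Int)))
    (rest : List (List (String × Int))) (v : PySem.Dict String Bool) (c : Int) :
    pvLoopB graph ([] :: rest) v c = pvLoopB graph rest v c := by
  rw [pvLoopB]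

theorem pvLoopB_cons_visited (graph : List (String × List (String × Int)))
    (each : String) (w : Int) (frame : List (String × Int))
    (rest : List (List (String × Int))) (v : PySem.Dict String Bool) (c : Int)
    (hmem : v.contains each = true) :
    pvLoopB graph (((each, w) :: frame) :: rest) v c = pvLoopB graph (frame :: rest) v c := by
  rw [pvLoopB, dif_pos hmem]

theorem pvLoopB_cons_none (graph : List (String × List (String × Int)))
    (each : String) (w : Int) (frame : List (String × Int))
    (rest : List (List (String × Int))) (v : PySem.Dict String Bool) (c : Int)
    (hmem : ¬ v.contains each = true) (hg : (PySem.Dict.mk graph).get? each = none) :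
    pvLoopB graph (((each, w) :: frame) :: rest) v c
      = pvLoopB graph (frame :: rest) (v.insert each true) (c + 1) := by
  rw [pvLoopB, dif_neg hmem]
  split
  · rfl
  · rename_i n heq
    rw [hg] at heq
    simp at heq

theorem pvLoopB_cons_some (graph : List (String × List (String × Int)))
    (each : String) (w : Int) (frame : List (String × Int))
    (rest : List (List (String × Int))) (v : PySem.Dict String Bool) (c : Int)
    (neigh : List (String × Int))
    (hmem : ¬ v.contains each = true) (hg : (PySem.Dict.mk graph).get? each = some neigh) :
    pvLoopB graph (((each, w) :: frame) :: rest) v c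
      = pvLoopB graph (neigh :: frame :: rest) (v.insert each true) (c + 1) := by
  rw [pvLoopB, dif_neg hmem]
  split
  · rename_i heq
    rw [hg] at heq
    simp at heq
  · rename_i n heq
    rw [hg] at heq
    injection heq with h
    subst h
    rfl

-- the simulation: running the stack loop on (pending :: rest) is running A's body on
-- pending and continuing with the resulting visited set and accumulated counter
theorem pvBridge (graph : List (String × List (String × Int))) :
    ∀ (pending : List (String × Int)) (rest : List (List (String × Int)))
      (v : PySem.Dict String Bool) (c : Int),
      pvLoopB graph (pending :: rest) v c
        = pvLoopB graph rest (pvGoA graph pending v).1.2 (c + (pvGoA graph pending v).1.1)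
  | [], rest, v, c => by
    rw [pvLoopB_empty, pvGoA_nil]
    simp
  | (each, w) :: restp, rest, v, c => by
    by_cases hmem : v.contains each = true
    · rw [pvLoopB_cons_visited graph each w restp rest v c hmem,
          pvGoA_cons_visited graph each w restp v hmem]
      exact pvBridge graph restp rest v c
    · cases hg : (PySem.Dict.mk graph).get? each with
      | none =>
        rw [pvLoopB_cons_none graph each w restp rest v c hmem hg,
            pvGoA_cons_none graph each w restp v hmem hg,
            pvBridge graph restp rest (v.insert each true) (c + 1)]
        have h : c + 1 + (pvGoA graph restp (v.insert each true)).1.1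
               = c + (1 + 0 + (pvGoA graph restp (v.insert each true)).1.1) := by ring
        rw [h]
      | some neigh =>
        rw [pvLoopB_cons_some graph each w restp rest v c neigh hmem hg,
            pvBridge graph neigh (restp :: rest) (v.insert each true) (c + 1),
            pvBridge graph restp rest (pvGoA graph neigh (v.insert each true)).1.2
              (c + 1 + (pvGoA graph neigh (v.insert each true)).1.1),
            pvGoA_cons_some graph each w restp v neigh hmem hg]
        have h : c + 1 + (pvGoA graph neigh (v.insert each true)).1.1
                   + (pvGoA graph restp (pvGoA graph neigh (v.insert each true)).1.2).1.1
               = c + (1 + (pvGoA graph neigh (v.insert each true)).1.1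
                   + (pvGoA graph restp (pvGoA graph neigh (v.insert each true)).1.2).1.1) := by
          ring
        rw [h]
termination_by pending _ v _ => (pvUnvis graph v, pending.length)
decreasing_by
  · exact Prod.Lex.right _ (Nat.lt_succ_self _)
  · rcases Nat.lt_or_ge (pvUnvis graph (v.insert each true)) (pvUnvis graph v) with h | h
    · exact Prod.Lex.left _ _ h
    · have hle := pvUnvis_le graph v (v.insert each true)
        (fun k hk => by rw [PySem.Dict.contains_insert, hk, Bool.or_true])
      rw [Nat.le_antisymm hle h]
      exact Prod.Lex.right _ (Nat.lt_succ_self _)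
  · exact Prod.Lex.left _ _ (pvUnvis_insert_lt graph v each (pvMem_of_get?_some graph each neigh hg) hmem)
  · exact Prod.Lex.left _ _
      (Nat.lt_of_le_of_lt (pvUnvis_le graph _ _ (pvGoA graph neigh (v.insert each true)).2)
        (pvUnvis_insert_lt graph v each (pvMem_of_get?_some graph each neigh hg) hmem))

-- ===== VERDICT (by name: the statement is the Claim_ definition above) =====
theorem part_one_spec : Claim_equal_part_one := by
  intro src graph visited _
  unfold Spec_part_one part_one part_one_alt
  cases hg : (PySem.Dict.mk graph).get? src with
  | none => rfl
  | some neigh =>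
    show (pvGoA graph neigh (PySem.Dict.mk visited)).1.1
       = pvLoopB graph [neigh] (PySem.Dict.mk visited) 0
    rw [pvBridge graph neigh [] (PySem.Dict.mk visited) 0, pvLoopB_nil]
    simp
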